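-- pv_equiv track=rewrite | github.com/Ke1thuzad/yandexPythonCourse | 2.4/R.py | generate_christmas_tree
-- ===== SOURCE A (Python) =====
-- def generate_christmas_tree(limit: int):
--     tree = []
--     row = []
--     n = 1
--     row_index = 1
--     elems_in_row = 0
--     while n <= limit:
--         row.append(n)
--         elems_in_row += 1
--         n += 1
--         if elems_in_row == row_index:
--             tree.append(row)
--             row = []
--             elems_in_row = 0
--             row_index += 1
--     if row:
--         tree.append(row)
--     return tree
-- ===== SOURCE B (Python) =====
-- def generate_christmas_tree(limit: int):
--     tree = []
--     start = 1
--     row_index = 1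
--     while start <= limit:
--         end = min(start + row_index - 1, limit)
--         tree.append(list(range(start, end + 1)))
--         start = end + 1
--         row_index += 1
--     return tree
-- ===== Notes on version B (the rewrite author's own statement) =====
-- stated objective: faster
-- what changed: B loops over rows, materializing each row as one consecutive block (range) capped at limit, instead of A's per-element loop with a fill counter and row buffer.
import Mathlib
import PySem

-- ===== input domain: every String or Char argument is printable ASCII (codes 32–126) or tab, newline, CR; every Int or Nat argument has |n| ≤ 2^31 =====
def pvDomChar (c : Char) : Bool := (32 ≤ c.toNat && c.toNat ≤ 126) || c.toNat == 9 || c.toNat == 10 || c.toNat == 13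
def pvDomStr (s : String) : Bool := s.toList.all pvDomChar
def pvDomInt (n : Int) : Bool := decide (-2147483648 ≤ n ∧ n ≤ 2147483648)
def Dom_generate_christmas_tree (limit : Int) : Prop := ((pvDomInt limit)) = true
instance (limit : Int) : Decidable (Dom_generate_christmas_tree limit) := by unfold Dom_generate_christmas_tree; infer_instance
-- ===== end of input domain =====

-- B builds each row as one consecutive block per outer iteration instead of A's per-element loop; fewer iterations (one per row).

-- ===== PORT A =====
-- A's while loop: state (tree, row, n, row_index, elems_in_row); returns (tree, row) at exit.
def pvALoop (limit : Int) (tree : List (List Int)) (row : List Int)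
    (n rowIndex elems : Int) : List (List Int) × List Int :=
  if _h : n ≤ limit then
    let row' := row ++ [n]
    let elems' := elems + 1
    if elems' = rowIndex then
      pvALoop limit (tree ++ [row']) [] (n + 1) (rowIndex + 1) 0
    else
      pvALoop limit tree row' (n + 1) rowIndex elems'
  else (tree, row)
termination_by (limit + 1 - n).toNat
decreasing_by all_goals omega

def generate_christmas_tree (limit : Int) : List (List Int) :=
  let p := pvALoop limit [] [] 1 1 0
  if p.2 = [] then p.1 else p.1 ++ [p.2]   -- 'if row: tree.append(row)'

-- ===== PORT B =====
-- B's while loop; k : Nat represents row_index - 1 (row_index = k + 1, starts at 1 and only grows).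
def pvBLoop (limit : Int) (tree : List (List Int)) (start : Int) (k : Nat) : List (List Int) :=
  if _h : start ≤ limit then
    let e := min (start + (k : Int)) limit   -- end = min(start + row_index - 1, limit)
    pvBLoop limit (tree ++ [PySem.List.pyRange start (e + 1) 1]) (e + 1) (k + 1)
  else tree
termination_by (limit + 1 - start).toNat
decreasing_by omega

def generate_christmas_tree_alt (limit : Int) : List (List Int) :=
  pvBLoop limit [] 1 0

-- ===== PRECONDITION & SPEC =====
def Spec_generate_christmas_tree (limit : Int) (out : List (List Int)) : Prop := out = generate_christmas_tree_alt limit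
instance (limit : Int) (out : List (List Int)) : Decidable (Spec_generate_christmas_tree limit out) := by unfold Spec_generate_christmas_tree; infer_instance

-- ===== CLAIM (what is proved, stated in full; the proofs are below) =====
def Claim_equal_generate_christmas_tree : Prop := ∀ (limit : Int), Dom_generate_christmas_tree limit → Spec_generate_christmas_tree limit (generate_christmas_tree limit)

-- ===== LEMMAS AND PROOFS =====

-- A's final 'if row: tree.append(row)'
def pvFinish (p : List (List Int) × List Int) : List (List Int) :=
  if p.2 = [] then p.1 else p.1 ++ [p.2]

-- Filling one row of A: starting with j free slots and n ≤ limit, the loop either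
-- completes the row with the block [n, …, n+j-1] or exits with the partial block [n, …, limit].
theorem pvALoop_fill (limit : Int) : ∀ (j : Nat), 0 < j →
    ∀ (tree : List (List Int)) (row : List Int) (n rowIndex elems : Int),
    elems = rowIndex - (j : Int) → n ≤ limit →
    pvALoop limit tree row n rowIndex elems =
      if n + (j : Int) - 1 ≤ limit then
        pvALoop limit (tree ++ [row ++ PySem.List.pyRange n (n + (j : Int)) 1]) [] (n + (j : Int)) (rowIndex + 1) 0
      else
        (tree, row ++ PySem.List.pyRange n (limit + 1) 1) := by
  intro j
  induction j with
  | zero => intro h; omega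
  | succ j' ih =>
    intro _ tree row n rowIndex elems helems hn
    rw [pvALoop]
    simp only [hn, dif_pos]
    by_cases hj' : j' = 0
    · subst hj'
      have : elems + 1 = rowIndex := by push_cast at helems ⊢; omega
      simp only [this, if_pos]
      have hcond : n + ((1 : Nat) : Int) - 1 ≤ limit := by push_cast; omega
      rw [if_pos hcond]
      have : PySem.List.pyRange n (n + ((1:Nat) : Int)) 1 = [n] := by
        push_cast
        exact PySem.List.pyRange_one_singleton n
      rw [this]
      push_cast
      rfl
    · have hne : ¬ (elems + 1 = rowIndex) := by
        push_cast at helems; omega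
      rw [if_neg hne]
      by_cases hn1 : n + 1 ≤ limit
      · rw [ih (by omega) tree (row ++ [n]) (n + 1) rowIndex (elems + 1)
            (by push_cast at helems ⊢; omega) hn1]
        have hsplit : PySem.List.pyRange n (n + ((j' + 1 : Nat) : Int)) 1
            = n :: PySem.List.pyRange (n + 1) (n + ((j' + 1 : Nat) : Int)) 1 := by
          apply PySem.List.pyRange_one_cons
          push_cast; omega
        have hsplit2 : PySem.List.pyRange n (limit + 1) 1
            = n :: PySem.List.pyRange (n + 1) (limit + 1) 1 := by
          apply PySem.List.pyRange_one_cons; omega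
        by_cases hc : n + 1 + ((j' : Nat) : Int) - 1 ≤ limit
        · rw [if_pos hc, if_pos (by push_cast at hc ⊢; omega)]
          rw [hsplit]
          have : n + 1 + ((j' : Nat) : Int) = n + ((j' + 1 : Nat) : Int) := by push_cast; ring
          rw [this]
          simp
        · rw [if_neg hc, if_neg (by push_cast at hc ⊢; omega)]
          rw [hsplit2]
          simp
      · -- n = limit: the inner call exits immediately with a partial row
        have hlim : limit = n := by omega
        rw [pvALoop]
        rw [dif_neg (by omega)]
        rw [if_neg (by push_cast; omega)]
        have : PySem.List.pyRange n (limit + 1) 1 = [n] := by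
          rw [hlim]; exact PySem.List.pyRange_one_singleton n
        rw [this]

-- Main invariant: at a row boundary, finishing A's loop equals B's row loop.
theorem pvMain (limit : Int) : ∀ (N : Nat) (k : Nat) (tree : List (List Int)) (n : Int),
    (limit + 1 - n).toNat ≤ N →
    pvFinish (pvALoop limit tree [] n ((k : Int) + 1) 0) = pvBLoop limit tree n k := by
  intro N
  induction N with
  | zero =>
    intro k tree n hN
    have hn : ¬ n ≤ limit := by omega
    rw [pvALoop, dif_neg hn, pvBLoop, dif_neg hn, pvFinish]
    simp
  | succ N ih =>
    intro k tree n hN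
    by_cases hn : n ≤ limit
    · rw [pvALoop_fill limit (k + 1) (by omega) tree [] n ((k : Int) + 1) 0
        (by push_cast; ring) hn]
      rw [pvBLoop, dif_pos hn]
      by_cases hc : n + ((k + 1 : Nat) : Int) - 1 ≤ limit
      · rw [if_pos hc]
        have hmin : min (n + (k : Int)) limit = n + (k : Int) := by push_cast at hc; omega
        rw [hmin]
        have h1 : ((k : Int) + 1) + 1 = ((k + 1 : Nat) : Int) + 1 := by push_cast; ring
        have h2 : n + ((k + 1 : Nat) : Int) = n + (k : Int) + 1 := by push_cast; ring
        rw [h1, h2, ih (k + 1) _ _ (by omega)]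
        simp
      · rw [if_neg hc]
        have hmin : min (n + (k : Int)) limit = limit := by push_cast at hc; omega
        rw [hmin]
        have hne : PySem.List.pyRange n (limit + 1) 1 ≠ [] := by
          rw [PySem.List.pyRange_one_cons (by omega)]; simp
        rw [pvFinish, if_neg (by simpa using hne)]
        rw [pvBLoop, dif_neg (by omega)]
        simp
    · rw [pvALoop, dif_neg hn, pvBLoop, dif_neg hn, pvFinish]
      simp

-- ===== VERDICT (by name: the statement is the Claim_ definition above) =====
theorem generate_christmas_tree_spec : Claim_equal_generate_christmas_tree := by
  intro limit _
  unfold Spec_generate_christmas_tree generate_christmas_tree generate_christmas_tree_alt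
  have := pvMain limit (limit + 1 - 1).toNat 0 [] 1 (le_refl _)
  simp only [Nat.cast_zero, zero_add] at this
  rw [← this, pvFinish]
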